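-- pv_equiv track=rewrite | github.com/VishalGowda23/DM-2_Dissater-Risk-Platform | disaster-intelligence-platform/backend/app/services/river_monitor.py | _get_overall_status
-- ===== SOURCE A (Python) =====
-- from typing import Dict, List, Optional
--
-- def _get_overall_status(levels: Dict) -> str:
--     """Get overall river system status"""
--     stages = [l.get("flood_stage", "normal") for l in levels.values()]
--     if "extreme" in stages:
--         return "critical"
--     if "danger" in stages:
--         return "danger"
--     if "warning" in stages:
--         return "elevated"
--     if "alert" in stages:
--         return "watch"
--     return "normal"
-- ===== SOURCE B (Python) =====
-- _PRIO = {"extreme": 4, "danger": 3, "warning": 2, "alert": 1}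
-- _NAME = {4: "critical", 3: "danger", 2: "elevated", 1: "watch", 0: "normal"}
--
-- def _get_overall_status(levels):
--     """Get overall river system status"""
--     worst = 0
--     for l in levels.values():
--         worst = max(worst, _PRIO.get(l.get("flood_stage", "normal"), 0))
--     return _NAME[worst]
-- ===== Notes on version B (the rewrite author's own statement) =====
-- stated objective: simpler
-- what changed: Replace four sequential full-list membership scans over the built stage list with a single pass that keeps the maximum severity priority and maps it back to a status string.
import Mathlib
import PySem

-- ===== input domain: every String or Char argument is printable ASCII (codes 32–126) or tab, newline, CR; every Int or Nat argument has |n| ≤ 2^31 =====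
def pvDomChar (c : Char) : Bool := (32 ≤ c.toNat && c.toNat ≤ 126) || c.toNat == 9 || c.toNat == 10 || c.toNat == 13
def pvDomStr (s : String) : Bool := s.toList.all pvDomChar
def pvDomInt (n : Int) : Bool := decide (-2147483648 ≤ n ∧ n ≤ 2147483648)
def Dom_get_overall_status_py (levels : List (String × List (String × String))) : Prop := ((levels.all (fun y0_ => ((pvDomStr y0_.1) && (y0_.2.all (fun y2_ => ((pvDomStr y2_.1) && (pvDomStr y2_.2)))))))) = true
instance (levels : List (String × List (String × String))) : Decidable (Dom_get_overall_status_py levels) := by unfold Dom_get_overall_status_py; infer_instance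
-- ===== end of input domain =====

-- B replaces A's four sequential membership scans over the stage list by a single
-- accumulator pass keeping the maximum severity priority (objective: simpler).

-- ===== PORT A =====
-- l.get("flood_stage", "normal") on a value dict, first-match lookup
def pvStage (l : List (String × String)) : String :=
  PySem.Dict.getD (PySem.Dict.mk l) "flood_stage" "normal"

def get_overall_status_py (levels : List (String × List (String × String))) : String :=
  let stages := levels.map (fun l => pvStage l.2)
  if "extreme" ∈ stages then "critical"
  else if "danger" ∈ stages then "danger"
  else if "warning" ∈ stages then "elevated"
  else if "alert" ∈ stages then "watch"
  else "normal"

-- ===== PORT B =====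
def pvPrioD : PySem.Dict String Nat :=
  PySem.Dict.mk [("extreme", 4), ("danger", 3), ("warning", 2), ("alert", 1)]

def pvNameD : PySem.Dict Nat String :=
  PySem.Dict.mk [(4, "critical"), (3, "danger"), (2, "elevated"), (1, "watch"), (0, "normal")]

def get_overall_status_py_alt (levels : List (String × List (String × String))) : String :=
  let worst := levels.foldl (fun m l => max m (pvPrioD.getD (pvStage l.2) 0)) 0
  -- _NAME[worst]: worst is always one of the keys 0..4, so the .getD default is never reached
  (pvNameD.get? worst).getD ""

-- ===== PRECONDITION & SPEC =====
def Spec_get_overall_status_py (levels : List (String × List (String × String))) (out : String) : Prop := out = get_overall_status_py_alt levels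
instance (levels : List (String × List (String × String))) (out : String) : Decidable (Spec_get_overall_status_py levels out) := by unfold Spec_get_overall_status_py; infer_instance

-- ===== CLAIM (what is proved, stated in full; the proofs are below) =====
def Claim_equal_get_overall_status_py : Prop := ∀ (levels : List (String × List (String × String))), Dom_get_overall_status_py levels → Spec_get_overall_status_py levels (get_overall_status_py levels)

-- ===== LEMMAS AND PROOFS =====

-- worst stage priority of a list of stage strings, as a foldr (for induction)
def pvN (l : List String) : Nat := l.foldr (fun s m => max (pvPrioD.getD s 0) m) 0

lemma pvPrio_eq (s : String) : pvPrioD.getD s 0 =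
    if "extreme" = s then 4 else if "danger" = s then 3
    else if "warning" = s then 2 else if "alert" = s then 1 else 0 := by
  by_cases h1 : "extreme" = s
  · subst h1; decide
  by_cases h2 : "danger" = s
  · subst h2; decide
  by_cases h3 : "warning" = s
  · subst h3; decide
  by_cases h4 : "alert" = s
  · subst h4; decide
  have e1 : ("extreme" == s) = false := by simp [h1]
  have e2 : ("danger" == s) = false := by simp [h2]
  have e3 : ("warning" == s) = false := by simp [h3]
  have e4 : ("alert" == s) = false := by simp [h4]
  simp [pvPrioD, PySem.Dict.getD, PySem.Dict.get?, List.find?, e1, e2, e3, e4, h1, h2, h3, h4]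

lemma pvPrio_le4 (s : String) : pvPrioD.getD s 0 ≤ 4 := by
  rw [pvPrio_eq]; split_ifs <;> omega

lemma pvPrio_ge4 (s : String) : 4 ≤ pvPrioD.getD s 0 ↔ "extreme" = s := by
  rw [pvPrio_eq]; split_ifs <;> simp_all

lemma pvPrio_ge3 (s : String) : 3 ≤ pvPrioD.getD s 0 ↔ ("extreme" = s ∨ "danger" = s) := by
  rw [pvPrio_eq]; split_ifs <;> simp_all

lemma pvPrio_ge2 (s : String) :
    2 ≤ pvPrioD.getD s 0 ↔ ("extreme" = s ∨ "danger" = s ∨ "warning" = s) := by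
  rw [pvPrio_eq]; split_ifs <;> simp_all

lemma pvPrio_ge1 (s : String) :
    1 ≤ pvPrioD.getD s 0 ↔ ("extreme" = s ∨ "danger" = s ∨ "warning" = s ∨ "alert" = s) := by
  rw [pvPrio_eq]; split_ifs <;> simp_all

lemma pvN_le (l : List String) : pvN l ≤ 4 := by
  induction l with
  | nil => simp [pvN]
  | cons s t ih =>
    have := pvPrio_le4 s
    simp only [pvN, List.foldr] at *
    omega

lemma pvN_ge_iff (p : String → Prop) (k : Nat) (hk : 1 ≤ k)
    (hp : ∀ s, k ≤ pvPrioD.getD s 0 ↔ p s) (l : List String) :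
    (∃ s ∈ l, p s) ↔ k ≤ pvN l := by
  induction l with
  | nil => simp [pvN]; omega
  | cons s t ih =>
    simp only [pvN, List.foldr] at *
    rw [le_max_iff, hp s, ← ih]
    constructor
    · rintro ⟨x, hx, hpx⟩
      rcases List.mem_cons.1 hx with rfl | hx
      · exact Or.inl hpx
      · exact Or.inr ⟨x, hx, hpx⟩
    · rintro (hps | ⟨x, hx, hpx⟩)
      · exact ⟨s, List.mem_cons_self, hps⟩
      · exact ⟨x, List.mem_cons_of_mem _ hx, hpx⟩

lemma pvN_mem4 (l : List String) : "extreme" ∈ l ↔ 4 ≤ pvN l := by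
  rw [← pvN_ge_iff _ 4 (by omega) pvPrio_ge4 l]
  constructor
  · intro h; exact ⟨_, h, rfl⟩
  · rintro ⟨s, hs, rfl⟩; exact hs

lemma pvN_mem3 (l : List String) : ("extreme" ∈ l ∨ "danger" ∈ l) ↔ 3 ≤ pvN l := by
  rw [← pvN_ge_iff _ 3 (by omega) pvPrio_ge3 l]
  constructor
  · rintro (h | h) <;> exact ⟨_, h, by simp⟩
  · rintro ⟨s, hs, rfl | rfl⟩ <;> simp [hs]

lemma pvN_mem2 (l : List String) :
    ("extreme" ∈ l ∨ "danger" ∈ l ∨ "warning" ∈ l) ↔ 2 ≤ pvN l := by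
  rw [← pvN_ge_iff _ 2 (by omega) pvPrio_ge2 l]
  constructor
  · rintro (h | h | h) <;> exact ⟨_, h, by simp⟩
  · rintro ⟨s, hs, rfl | rfl | rfl⟩ <;> simp [hs]

lemma pvN_mem1 (l : List String) :
    ("extreme" ∈ l ∨ "danger" ∈ l ∨ "warning" ∈ l ∨ "alert" ∈ l) ↔ 1 ≤ pvN l := by
  rw [← pvN_ge_iff _ 1 (by omega) pvPrio_ge1 l]
  constructor
  · rintro (h | h | h | h) <;> exact ⟨_, h, by simp⟩
  · rintro ⟨s, hs, rfl | rfl | rfl | rfl⟩ <;> simp [hs]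

lemma pv_foldl_max (l : List String) (a : Nat) :
    l.foldl (fun m s => max m (pvPrioD.getD s 0)) a = max a (pvN l) := by
  induction l generalizing a with
  | nil => simp [pvN]
  | cons s t ih =>
    simp only [List.foldl, pvN, List.foldr] at *
    rw [ih]; omega

lemma pv_alt_eq (levels : List (String × List (String × String))) :
    get_overall_status_py_alt levels =
      (pvNameD.get? (pvN (levels.map (fun l => pvStage l.2)))).getD "" := by
  unfold get_overall_status_py_alt
  have : levels.foldl (fun m l => max m (pvPrioD.getD (pvStage l.2) 0)) 0
      = (levels.map (fun l => pvStage l.2)).foldl (fun m s => max m (pvPrioD.getD s 0)) 0 := by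
    rw [List.foldl_map]
  rw [this, pv_foldl_max]
  simp

-- ===== VERDICT (by name: the statement is the Claim_ definition above) =====
theorem get_overall_status_py_spec : Claim_equal_get_overall_status_py := by
  intro levels _
  show get_overall_status_py levels = get_overall_status_py_alt levels
  rw [pv_alt_eq]
  unfold get_overall_status_py
  set stages := levels.map (fun l => pvStage l.2) with hst
  have hle := pvN_le stages
  by_cases h1 : "extreme" ∈ stages
  · have hv : pvN stages = 4 := by have := (pvN_mem4 stages).1 h1; omega
    simp [h1, hv]; decide
  by_cases h2 : "danger" ∈ stages
  · have hv : pvN stages = 3 := by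
      have := (pvN_mem3 stages).1 (Or.inr h2)
      have hne : ¬ 4 ≤ pvN stages := fun hc => h1 ((pvN_mem4 stages).2 hc)
      omega
    simp [h1, h2, hv]; decide
  by_cases h3 : "warning" ∈ stages
  · have hv : pvN stages = 2 := by
      have := (pvN_mem2 stages).1 (Or.inr (Or.inr h3))
      have hne : ¬ 3 ≤ pvN stages := fun hc => by
        rcases (pvN_mem3 stages).2 hc with h | h
        · exact h1 h
        · exact h2 h
      omega
    simp [h1, h2, h3, hv]; decide
  by_cases h5 : "alert" ∈ stages
  · have hv : pvN stages = 1 := by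
      have := (pvN_mem1 stages).1 (Or.inr (Or.inr (Or.inr h5)))
      have hne : ¬ 2 ≤ pvN stages := fun hc => by
        rcases (pvN_mem2 stages).2 hc with h | h | h
        · exact h1 h
        · exact h2 h
        · exact h3 h
      omega
    simp [h1, h2, h3, h5, hv]; decide
  · have hv : pvN stages = 0 := by
      have hne : ¬ 1 ≤ pvN stages := fun hc => by
        rcases (pvN_mem1 stages).2 hc with h | h | h | h
        · exact h1 h
        · exact h2 h
        · exact h3 h
        · exact h5 h
      omega
    simp [h1, h2, h3, h5, hv]; decide
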